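-- pv_equiv track=rewrite | github.com/biniyamNegasa/aoc | 2025/3/a.py | solve
-- ===== SOURCE A (Python) =====
-- def solve(s):
--     n = len(s)
--     pos = 0
--     limit = 12
--     ind = 0
--     ans = []
--     for pos in range(limit):
--         for i in range(9, 0, -1):
--             t = ind
--             while t < n - limit + pos + 1 and s[t] != str(i):
--                 t += 1
--             if t < n - limit + pos + 1:
--                 ans.append(str(i))
--                 ind = t + 1
--                 break
--     return "".join(ans)
-- ===== SOURCE B (Python) =====
-- def solve(s):
--     n = len(s)
--     ind = 0
--     ans = []
--     for pos in range(12):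
--         hi = n - 12 + pos + 1
--         best = None  # (digit char, index) of leftmost maximal digit in the window
--         for t in range(ind, hi):
--             c = s[t]
--             if '1' <= c <= '9' and (best is None or c > best[0]):
--                 best = (c, t)
--                 if c == '9':  # nothing can beat a '9'; leftmost '9' wins
--                     break
--         if best is not None:
--             ans.append(best[0])
--             ind = best[1] + 1
--     return "".join(ans)
-- ===== Notes on version B (the rewrite author's own statement) =====
-- stated objective: faster
-- what changed: Per output position, A restarts a linear search of the window once for each digit from highest to lowest (up to nine scans); B makes a single left-to-right scan of the window keeping the leftmost maximal digit seen, stopping early once the maximal possible digit appears.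
import Mathlib
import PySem

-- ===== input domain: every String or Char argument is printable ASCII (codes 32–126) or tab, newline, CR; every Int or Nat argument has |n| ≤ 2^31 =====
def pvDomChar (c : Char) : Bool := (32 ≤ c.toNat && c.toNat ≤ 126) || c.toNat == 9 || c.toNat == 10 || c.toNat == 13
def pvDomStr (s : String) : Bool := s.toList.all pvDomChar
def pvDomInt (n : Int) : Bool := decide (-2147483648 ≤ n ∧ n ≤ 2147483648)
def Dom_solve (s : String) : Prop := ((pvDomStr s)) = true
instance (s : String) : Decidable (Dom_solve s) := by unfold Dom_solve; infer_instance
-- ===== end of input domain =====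

-- B replaces A's nine restart-searches per output position (one while-scan per digit,
-- highest to lowest) by a single left-to-right scan of the window keeping the leftmost
-- maximal digit seen, stopping early once the maximal possible digit appears;
-- objective: faster (fewer window scans; measurably faster in a timing run).

-- ===== PORT A =====
-- str(i) as a character; exact for the loop's values 1 ≤ i ≤ 9
def digitStrA (i : Int) : Char := Char.ofNat (48 + i.toNat)

-- `t = ind; while t < hi and s[t] != str(i): t += 1` — s[t] is read only when 0 ≤ t < hi ≤ len s,
-- where List.getD is exactly Python's s[t]
def whileFindA (cs : List Char) (hi t : Int) (c : Char) : Int :=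
  if h : t < hi ∧ cs.getD t.toNat ' ' ≠ c then whileFindA cs hi (t+1) c else t
termination_by (hi - t).toNat
decreasing_by omega

-- the `for i in range(9, 0, -1)` loop with its `break`: first digit found, else none
def tryDigitsA (cs : List Char) (hi ind : Int) : List Int → Option (Char × Int)
  | [] => none
  | i :: rest =>
      let t := whileFindA cs hi ind (digitStrA i)
      if t < hi then some (digitStrA i, t) else tryDigitsA cs hi ind rest

-- one iteration of `for pos in range(limit)` over the state (ind, ans)
def stepA (cs : List Char) (n : Int) (st : Int × List Char) (pos : Int) : Int × List Char :=
  match tryDigitsA cs (n - 12 + pos + 1) st.1 (PySem.List.pyRange 9 0 (-1)) with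
  | some (c, t) => (t + 1, st.2 ++ [c])
  | none => st

def solve (s : String) : String :=
  let cs := s.toList
  let n : Int := (cs.length : Int)
  String.ofList (((PySem.List.pyRange 0 12 1).foldl (stepA cs n) (0, [])).2)

-- ===== PORT B =====
-- `best is None or c > best[0]`
def betterB (best : Option (Char × Int)) (c : Char) : Bool :=
  match best with
  | none => true
  | some b => decide (b.1 < c)

-- the inner `for t in range(ind, hi)` with its `break` on '9'
def scanB (cs : List Char) : List Int → Option (Char × Int) → Option (Char × Int)
  | [], best => best
  | t :: ts, best =>
      let c := cs.getD t.toNat ' '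
      if ('1' ≤ c ∧ c ≤ '9') ∧ betterB best c = true then
        if c = '9' then some (c, t) else scanB cs ts (some (c, t))
      else scanB cs ts best

-- one iteration of `for pos in range(12)` over the state (ind, ans)
def stepB (cs : List Char) (n : Int) (st : Int × List Char) (pos : Int) : Int × List Char :=
  let hi := n - 12 + pos + 1
  match scanB cs (PySem.List.pyRange st.1 hi 1) none with
  | some (c, t) => (t + 1, st.2 ++ [c])
  | none => st

def solve_alt (s : String) : String :=
  let cs := s.toList
  let n : Int := (cs.length : Int)
  String.ofList (((PySem.List.pyRange 0 12 1).foldl (stepB cs n) (0, [])).2)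

-- ===== PRECONDITION & SPEC =====
def Spec_solve (s : String) (out : String) : Prop := out = solve_alt s
instance (s : String) (out : String) : Decidable (Spec_solve s out) := by unfold Spec_solve; infer_instance

-- ===== CLAIM (what is proved, stated in full; the proofs are below) =====
def Claim_equal_solve : Prop := ∀ (s : String), Dom_solve s → Spec_solve s (solve s)

-- ===== LEMMAS AND PROOFS =====

-- Char order / equality through toNat
theorem char_le_iff (a b : Char) : a ≤ b ↔ a.toNat ≤ b.toNat := by
  rw [Char.le_def, UInt32.le_iff_toNat_le]; rfl

theorem char_lt_iff (a b : Char) : a < b ↔ a.toNat < b.toNat := by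
  rw [Char.lt_def, UInt32.lt_iff_toNat_lt]; rfl

theorem char_eq_of_toNat (a b : Char) (h : a.toNat = b.toNat) : a = b := by
  apply Char.ext; exact UInt32.toNat_inj.mp h

-- the descending digit list [k, …, 1] that A's inner loop iterates over
def dL : Nat → List Int
  | 0 => []
  | k + 1 => ((k + 1 : Nat) : Int) :: dL k

theorem pyRange_desc : PySem.List.pyRange 9 0 (-1) = dL 9 := by decide

def dcN (k : Nat) : Char := Char.ofNat (48 + k)

theorem toNat_dcN (k : Nat) (h : k ≤ 9) : (dcN k).toNat = 48 + k := by
  unfold dcN; interval_cases k <;> decide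

theorem digitStrA_natCast (k : Nat) : digitStrA ((k : Nat) : Int) = dcN k := by
  simp [digitStrA, dcN]

-- the window, as a list of (character, index) pairs
def windowW (cs : List Char) (lo hi : Int) : List (Char × Int) :=
  (PySem.List.pyRange lo hi 1).map (fun u => (cs.getD u.toNat ' ', u))

-- reference: leftmost maximal digit among '1'..'<digit k>' (earlier element wins ties)
def inDb (k : Nat) (c : Char) : Bool := 49 ≤ c.toNat && c.toNat ≤ 48 + k

def combineL (k : Nat) (x : Char × Int) : Option (Char × Int) → Option (Char × Int)
  | none => if inDb k x.1 then some x else none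
  | some b => if inDb k x.1 && decide (b.1.toNat ≤ x.1.toNat) then some x else some b

def lm (k : Nat) : List (Char × Int) → Option (Char × Int)
  | [] => none
  | x :: w => combineL k x (lm k w)

theorem combineL_none (k : Nat) (x : Char × Int) :
    combineL k x none = if inDb k x.1 then some x else none := rfl

theorem combineL_some (k : Nat) (x b : Char × Int) :
    combineL k x (some b) =
      if inDb k x.1 && decide (b.1.toNat ≤ x.1.toNat) then some x else some b := rfl

theorem lm_cons (k : Nat) (x : Char × Int) (w : List (Char × Int)) :
    lm k (x :: w) = combineL k x (lm k w) := rfl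

def mergeO (best r : Option (Char × Int)) : Option (Char × Int) :=
  match r with
  | none => best
  | some x =>
      match best with
      | none => some x
      | some b => if b.1.toNat < x.1.toNat then some x else some b

theorem mergeO_none (r : Option (Char × Int)) : mergeO none r = r := by
  cases r <;> rfl

theorem mergeO_r_none (best : Option (Char × Int)) : mergeO best none = best := rfl

theorem mergeO_some_some (b x : Char × Int) :
    mergeO (some b) (some x) = if b.1.toNat < x.1.toNat then some x else some b := rfl

theorem lm_bound (k : Nat) (w : List (Char × Int)) (b : Char × Int) (h : lm k w = some b) :
    49 ≤ b.1.toNat ∧ b.1.toNat ≤ 48 + k := by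
  induction w with
  | nil => simp [lm] at h
  | cons x w ih =>
    rw [lm_cons] at h
    cases hw : lm k w with
    | none =>
      rw [hw, combineL_none] at h
      by_cases hx : inDb k x.1 = true
      · rw [if_pos hx] at h
        cases h
        simpa [inDb, Bool.and_eq_true, decide_eq_true_iff] using hx
      · rw [if_neg hx] at h; cases h
    | some b' =>
      rw [hw, combineL_some] at h
      by_cases hx : (inDb k x.1 && decide (b'.1.toNat ≤ x.1.toNat)) = true
      · rw [if_pos hx] at h
        cases h
        have := hx
        simp only [Bool.and_eq_true, decide_eq_true_iff, inDb] at this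
        omega
      · rw [if_neg hx] at h
        cases h
        exact ih hw

-- B's scan over the index list, rewritten over the window
def scanW : List (Char × Int) → Option (Char × Int) → Option (Char × Int)
  | [], best => best
  | x :: w, best =>
      if ('1' ≤ x.1 ∧ x.1 ≤ '9') ∧ betterB best x.1 = true then
        if x.1 = '9' then some x else scanW w (some x)
      else scanW w best

theorem scanB_eq_scanW (cs : List Char) (ts : List Int) (best : Option (Char × Int)) :
    scanB cs ts best = scanW (ts.map (fun u => (cs.getD u.toNat ' ', u))) best := by
  induction ts generalizing best with
  | nil => rfl
  | cons t ts ih => simp only [scanB, scanW, List.map_cons, ih]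

theorem scanW_eq_merge (w : List (Char × Int)) (best : Option (Char × Int))
    (hb : ∀ b, best = some b → b.1.toNat < 57) :
    scanW w best = mergeO best (lm 9 w) := by
  induction w generalizing best with
  | nil => cases best <;> rfl
  | cons x w ih =>
    have h1 : ('1' : Char).toNat = 49 := by decide
    have h9 : ('9' : Char).toNat = 57 := by decide
    by_cases hC : (('1' ≤ x.1 ∧ x.1 ≤ '9') ∧ betterB best x.1 = true)
    · obtain ⟨⟨hlo, hhi⟩, hbet⟩ := hC
      have hlo' := (char_le_iff _ _).mp hlo
      have hhi' := (char_le_iff _ _).mp hhi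
      rw [h1] at hlo'; rw [h9] at hhi'
      have hin : inDb 9 x.1 = true := by
        simp only [inDb, Bool.and_eq_true, decide_eq_true_iff]; omega
      have hmb : mergeO best (some x) = some x := by
        cases best with
        | none => rfl
        | some b =>
          have hblt : b.1 < x.1 := by simpa [betterB, decide_eq_true_iff] using hbet
          rw [char_lt_iff] at hblt
          rw [mergeO_some_some, if_pos hblt]
      by_cases hx9 : x.1 = '9'
      · have hx57 : x.1.toNat = 57 := by rw [hx9]; exact h9
        have hsc : scanW (x :: w) best = some x := by
          simp only [scanW]
          rw [if_pos ⟨⟨hlo, hhi⟩, hbet⟩, if_pos hx9]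
        have hlm : lm 9 (x :: w) = some x := by
          rw [lm_cons]
          cases hw : lm 9 w with
          | none => rw [combineL_none, if_pos hin]
          | some b' =>
            have hb' := lm_bound 9 w b' hw
            rw [combineL_some,
              if_pos (by rw [hin, decide_eq_true (show b'.1.toNat ≤ x.1.toNat by omega)]; rfl)]
        rw [hsc, hlm, hmb]
      · have hx57 : x.1.toNat < 57 := by
          rcases Nat.lt_or_ge x.1.toNat 57 with h | h
          · exact h
          · exact absurd (char_eq_of_toNat x.1 '9' (by omega)) hx9
        have hsc : scanW (x :: w) best = scanW w (some x) := by
          simp only [scanW]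
          rw [if_pos ⟨⟨hlo, hhi⟩, hbet⟩, if_neg hx9]
        rw [hsc, ih (some x) (by intro b hb'; cases hb'; omega)]
        cases hw : lm 9 w with
        | none =>
          rw [lm_cons, hw, combineL_none, if_pos hin, mergeO_r_none, hmb]
        | some b' =>
          by_cases hd : b'.1.toNat ≤ x.1.toNat
          · rw [lm_cons, hw, combineL_some,
              if_pos (by rw [hin, decide_eq_true hd]; rfl),
              mergeO_some_some, if_neg (by omega), hmb]
          · rw [lm_cons, hw, combineL_some,
              if_neg (by simp only [Bool.and_eq_true, decide_eq_true_iff]; rintro ⟨-, h⟩; omega),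
              mergeO_some_some, if_pos (by omega)]
            cases best with
            | none => rfl
            | some b =>
              have hblt : b.1 < x.1 := by simpa [betterB, decide_eq_true_iff] using hbet
              rw [char_lt_iff] at hblt
              rw [mergeO_some_some, if_pos (by omega)]
    · have hsc : scanW (x :: w) best = scanW w best := by
        simp only [scanW]; rw [if_neg hC]
      rw [hsc, ih best hb]
      by_cases hin : inDb 9 x.1 = true
      · have hdig : 49 ≤ x.1.toNat ∧ x.1.toNat ≤ 57 := by
          simpa [inDb, Bool.and_eq_true, decide_eq_true_iff] using hin
        have hbet : betterB best x.1 = false := by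
          cases hbb : betterB best x.1
          · rfl
          · exact absurd ⟨⟨(char_le_iff _ _).mpr (by omega), (char_le_iff _ _).mpr (by omega)⟩,
              hbb⟩ hC
        obtain ⟨b, hbsome⟩ : ∃ b, best = some b := by
          cases best with
          | none => simp [betterB] at hbet
          | some b => exact ⟨b, rfl⟩
        subst hbsome
        have hxb : x.1.toNat ≤ b.1.toNat := by
          have : ¬ (b.1 < x.1) := by simpa [betterB, decide_eq_true_iff] using hbet
          rw [char_lt_iff] at this; omega
        cases hw : lm 9 w with
        | none =>
          rw [lm_cons, hw, combineL_none, if_pos hin, mergeO_r_none,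
            mergeO_some_some, if_neg (by omega)]
        | some b' =>
          by_cases hd : b'.1.toNat ≤ x.1.toNat
          · rw [lm_cons, hw, combineL_some,
              if_pos (by rw [hin, decide_eq_true hd]; rfl),
              mergeO_some_some, mergeO_some_some, if_neg (by omega), if_neg (by omega)]
          · rw [lm_cons, hw, combineL_some,
              if_neg (by simp only [Bool.and_eq_true, decide_eq_true_iff]; rintro ⟨-, h⟩; omega)]
      · have hinf : inDb 9 x.1 = false := by
          cases h : inDb 9 x.1
          · rfl
          · exact absurd h hin
        cases hw : lm 9 w with
        | none => rw [lm_cons, hw, combineL_none, if_neg (by rw [hinf]; simp)]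
        | some b' =>
          rw [lm_cons, hw, combineL_some, if_neg (by rw [hinf]; simp)]

theorem whileFindA_spec (cs : List Char) (hi : Int) (c : Char) (t : Int) :
    (∀ p, (windowW cs t hi).find? (fun q => decide (q.1 = c)) = some p →
        whileFindA cs hi t c = p.2 ∧ p.2 < hi) ∧
    ((windowW cs t hi).find? (fun q => decide (q.1 = c)) = none → hi ≤ whileFindA cs hi t c) := by
  fun_induction whileFindA cs hi t c with
  | case1 t h ih =>
    obtain ⟨hlt, hne⟩ := h
    have hwin : windowW cs t hi = (cs.getD t.toNat ' ', t) :: windowW cs (t + 1) hi := by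
      unfold windowW
      rw [PySem.List.pyRange_one_cons hlt, List.map_cons]
    rw [hwin]
    rw [List.find?_cons_of_neg (by simpa [List.getD] using hne)]
    exact ih
  | case2 t h =>
    by_cases hlt : t < hi
    · have heq : cs.getD t.toNat ' ' = c := by
        by_cases he : cs.getD t.toNat ' ' = c
        · exact he
        · exact absurd ⟨hlt, he⟩ h
      have hwin : windowW cs t hi = (cs.getD t.toNat ' ', t) :: windowW cs (t + 1) hi := by
        unfold windowW
        rw [PySem.List.pyRange_one_cons hlt, List.map_cons]
      rw [hwin, List.find?_cons_of_pos (by simpa [List.getD] using heq)]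
      constructor
      · intro p hp
        cases hp
        exact ⟨rfl, hlt⟩
      · intro hnone; cases hnone
    · have hwin : windowW cs t hi = [] := by
        unfold windowW
        rw [PySem.List.pyRange_one_eq_nil (by omega), List.map_nil]
      rw [hwin]
      constructor
      · intro p hp; cases hp
      · intro _; omega

theorem lm_step (k : Nat) (hk : k ≤ 8) (w : List (Char × Int)) :
    lm (k + 1) w =
      (match w.find? (fun q => decide (q.1 = dcN (k + 1))) with
       | some p => some p
       | none => lm k w) := by
  have hdc : (dcN (k + 1)).toNat = 49 + k := by rw [toNat_dcN (k + 1) (by omega)]; omega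
  induction w with
  | nil => rfl
  | cons x w ih =>
    by_cases hx : x.1 = dcN (k + 1)
    · rw [List.find?_cons_of_pos (by simp [hx])]
      have hxt : x.1.toNat = 49 + k := by rw [hx, hdc]
      have hin : inDb (k + 1) x.1 = true := by
        simp only [inDb, Bool.and_eq_true, decide_eq_true_iff]; omega
      rw [lm_cons]
      cases hw : lm (k + 1) w with
      | none => rw [combineL_none, if_pos hin]
      | some b' =>
        have hb' := lm_bound (k + 1) w b' hw
        rw [combineL_some, if_pos (by rw [hin, decide_eq_true (show b'.1.toNat ≤ x.1.toNat by omega)]; rfl)]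
    · have hxt : x.1.toNat ≠ 49 + k := by
        intro h
        exact hx (char_eq_of_toNat x.1 (dcN (k + 1)) (by omega))
      rw [List.find?_cons_of_neg (by simp [hx])]
      cases hf : w.find? (fun q => decide (q.1 = dcN (k + 1))) with
      | some p =>
        have hp1 : p.1 = dcN (k + 1) := by simpa using List.find?_some hf
        have hp1t : p.1.toNat = 49 + k := by rw [hp1, hdc]
        rw [hf] at ih
        rw [lm_cons, ih, combineL_some,
          if_neg (by simp only [inDb, Bool.and_eq_true, decide_eq_true_iff]
                     rintro ⟨⟨-, h2⟩, h3⟩; omega)]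
      | none =>
        rw [hf] at ih
        have hin_eq : inDb (k + 1) x.1 = inDb k x.1 := by
          unfold inDb
          congr 1
          rw [decide_eq_decide]
          omega
        rw [lm_cons, ih, lm_cons]
        cases lm k w <;> simp [combineL, hin_eq]

theorem lm_zero (w : List (Char × Int)) : lm 0 w = none := by
  induction w with
  | nil => rfl
  | cons x w ih =>
    have hx : inDb 0 x.1 = false := by
      simp only [inDb, Bool.and_eq_false_iff, decide_eq_false_iff_not]
      omega
    rw [lm_cons, ih, combineL_none, if_neg (by rw [hx]; simp)]

theorem tryDigits_eq_lm (cs : List Char) (hi ind : Int) (k : Nat) (hk : k ≤ 9) :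
    tryDigitsA cs hi ind (dL k) = lm k (windowW cs ind hi) := by
  induction k with
  | zero => rw [lm_zero]; rfl
  | succ k ih =>
    rw [lm_step k (by omega)]
    show tryDigitsA cs hi ind (((k + 1 : Nat) : Int) :: dL k) = _
    simp only [tryDigitsA, digitStrA_natCast]
    cases hf : (windowW cs ind hi).find? (fun q => decide (q.1 = dcN (k + 1))) with
    | some p =>
      obtain ⟨hwf, hlt⟩ := (whileFindA_spec cs hi (dcN (k + 1)) ind).1 p hf
      rw [hwf, if_pos hlt]
      have hp1 : p.1 = dcN (k + 1) := by simpa using List.find?_some hf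
      obtain ⟨p1, p2⟩ := p
      simp only at hp1
      rw [hp1]
    | none =>
      have hge := (whileFindA_spec cs hi (dcN (k + 1)) ind).2 hf
      rw [if_neg (by omega)]
      exact ih (by omega)

theorem innerEq (cs : List Char) (hi ind : Int) :
    tryDigitsA cs hi ind (PySem.List.pyRange 9 0 (-1)) =
      scanB cs (PySem.List.pyRange ind hi 1) none := by
  rw [pyRange_desc, tryDigits_eq_lm cs hi ind 9 (by omega), scanB_eq_scanW,
    scanW_eq_merge _ none (by intro b h; cases h), mergeO_none]
  rfl

theorem stepEq (cs : List Char) (n : Int) : stepA cs n = stepB cs n := by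
  funext st pos
  simp only [stepA, stepB, innerEq]

-- ===== VERDICT (by name: the statement is the Claim_ definition above) =====
theorem solve_spec : Claim_equal_solve := by
  intro s _
  unfold Spec_solve solve solve_alt
  simp only [stepEq]
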